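-- pv_equiv track=rewrite | github.com/sofig888/TRC | legacy_scripts/pistacam.py | choose_lane_edges
-- ===== SOURCE A (Python) =====
-- LANE_WIDTH_MIN = 140     # px (ajusta según FOV/altura)
--
-- LANE_WIDTH_MAX = 420     # px
--
-- carril_objetivo = "LEFT"   # "LEFT" o "RIGHT"
--
-- def choose_lane_edges(cluster_centers, w):
--     """
--     cluster_centers: lista de x (bordes detectados, ordenados)
--     Devuelve (xL, xR) o (None, None)
--     """
--     if len(cluster_centers) < 2:
--         return None, None
--
--     xs = sorted(cluster_centers)
--
--     # generar pares candidatos (xL < xR) con ancho plausible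
--     pairs = []
--     for i in range(len(xs)):
--         for j in range(i + 1, len(xs)):
--             xL, xR = xs[i], xs[j]
--             width = xR - xL
--             if LANE_WIDTH_MIN <= width <= LANE_WIDTH_MAX:
--                 pairs.append((xL, xR, width))
--
--     if not pairs:
--         return None, None
--
--     # Para carril LEFT, preferimos el par más a la izquierda.
--     # Para carril RIGHT, preferimos el par más a la derecha.
--     if carril_objetivo == "LEFT":
--         pairs.sort(key=lambda p: (p[0], p[2]))      # menor xL primero
--     else:
--         pairs.sort(key=lambda p: (-p[1], p[2]))     # mayor xR primero
--
--     # tomar el mejor candidato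
--     xL, xR, _ = pairs[0]
--     return xL, xR
-- ===== SOURCE B (Python) =====
-- def choose_lane_edges(cluster_centers, w):
--     """
--     cluster_centers: lista de x (bordes detectados, ordenados)
--     Devuelve (xL, xR) o (None, None)
--     """
--     # Scan the sorted edges left to right; for the first edge that has a
--     # plausible-width partner, the nearest partner at distance >= LANE_WIDTH_MIN
--     # is the best one (widths beyond it only grow), so no pair list and no
--     # second sort are needed.
--     xs = sorted(cluster_centers)
--     while xs:
--         x, xs = xs[0], xs[1:]
--         for y in xs:
--             if y - x < 140:
--                 continue
--             if y - x <= 420: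
--                 return x, y
--             break
--     return None, None
-- ===== Notes on version B (the rewrite author's own statement) =====
-- stated objective: faster
-- what changed: B drops A's materialize-all-plausible-pairs-then-stable-sort pipeline: it scans the sorted edges once left to right and, for the first edge with a plausible-width partner, returns the nearest such partner (sortedness makes that pair exactly A's lexicographic minimum), exiting early.
import Mathlib
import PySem

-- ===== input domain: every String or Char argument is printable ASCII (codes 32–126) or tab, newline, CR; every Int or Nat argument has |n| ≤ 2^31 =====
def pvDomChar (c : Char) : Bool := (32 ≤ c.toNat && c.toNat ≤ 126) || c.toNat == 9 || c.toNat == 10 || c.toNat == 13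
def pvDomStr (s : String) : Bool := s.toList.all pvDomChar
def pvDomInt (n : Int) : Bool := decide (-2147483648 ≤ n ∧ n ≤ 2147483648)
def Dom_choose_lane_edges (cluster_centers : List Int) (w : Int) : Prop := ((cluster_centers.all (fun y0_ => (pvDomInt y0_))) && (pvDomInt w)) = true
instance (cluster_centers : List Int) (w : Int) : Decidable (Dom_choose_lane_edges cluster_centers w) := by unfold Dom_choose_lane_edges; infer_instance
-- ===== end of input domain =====

-- B replaces A's build-all-pairs-then-sort with a single early-exit scan of the
-- sorted edges (first left edge with a plausible-width partner, nearest such partner).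


-- ===== PORT A =====
def LANE_WIDTH_MIN : Int := 140
def LANE_WIDTH_MAX : Int := 420
def carril_objetivo : String := "LEFT"

-- the two nested 'for' loops building 'pairs' (xs[i] ported as pyGetD, exact: i,j in range)
def pvPairsA (xs : List Int) : List (Int × Int × Int) :=
  (PySem.List.pyRange 0 (xs.length : Int)).foldl (fun acc i =>
    (PySem.List.pyRange (i + 1) (xs.length : Int)).foldl (fun acc2 j =>
      let xL := PySem.List.pyGetD xs i 0
      let xR := PySem.List.pyGetD xs j 0
      let width := xR - xL
      if LANE_WIDTH_MIN ≤ width ∧ width ≤ LANE_WIDTH_MAX then acc2 ++ [(xL, xR, width)]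
      else acc2) acc) []

def choose_lane_edges (cluster_centers : List Int) (w : Int) : Option Int × Option Int :=
  if cluster_centers.length < 2 then (none, none)
  else
    let xs := PySem.List.sorted cluster_centers (fun x => x)
    let pairs := pvPairsA xs
    if pairs = [] then (none, none)
    else
      let sortedPairs :=
        if carril_objetivo = "LEFT" then
          PySem.List.sorted2 pairs (fun p => p.1) (fun p => p.2.2)
        else
          PySem.List.sorted2 pairs (fun p => -p.2.1) (fun p => p.2.2)
      match sortedPairs with
      | [] => (none, none)   -- unreachable: sortedPairs is a permutation of the nonempty 'pairs'
      | p :: _ => (some p.1, some p.2.1)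

-- ===== PORT B =====
-- inner 'for y in xs: …'
def pvScanB (x : Int) : List Int → Option (Int × Int)
  | [] => none
  | y :: ys =>
      if y - x < 140 then pvScanB x ys
      else if y - x ≤ 420 then some (x, y)
      else none          -- 'break'

-- outer 'while xs: x, xs = xs[0], xs[1:] …'
def pvLoopB : List Int → Option Int × Option Int
  | [] => (none, none)
  | x :: xs =>
      match pvScanB x xs with
      | some (a, b) => (some a, some b)
      | none => pvLoopB xs

def choose_lane_edges_alt (cluster_centers : List Int) (w : Int) : Option Int × Option Int :=
  pvLoopB (PySem.List.sorted cluster_centers (fun x => x))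

-- ===== PRECONDITION & SPEC =====
def Spec_choose_lane_edges (cluster_centers : List Int) (w : Int) (out : Option Int × Option Int) : Prop := out = choose_lane_edges_alt cluster_centers w
instance (cluster_centers : List Int) (w : Int) (out : Option Int × Option Int) : Decidable (Spec_choose_lane_edges cluster_centers w out) := by unfold Spec_choose_lane_edges; infer_instance

-- ===== CLAIM (what is proved, stated in full; the proofs are below) =====
def Claim_equal_choose_lane_edges : Prop := ∀ (cluster_centers : List Int) (w : Int), Dom_choose_lane_edges cluster_centers w → Spec_choose_lane_edges cluster_centers w (choose_lane_edges cluster_centers w)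

-- ===== LEMMAS AND PROOFS =====
-- proof helpers (below the claim block in the real file)
def pvG (xs : List Int) (k : Nat) : List (Int × Int × Int) :=
  ((xs.drop (k+1)).filter (fun y => decide (140 ≤ y - xs.getD k 0) && decide (y - xs.getD k 0 ≤ 420))).map
    (fun y => (xs.getD k 0, y, y - xs.getD k 0))

def pvPairsL : List Int → List (Int × Int × Int)
  | [] => []
  | x :: rest =>
      ((rest.filter (fun y => decide (140 ≤ y - x) && decide (y - x ≤ 420))).map
        (fun y => (x, y, y - x))) ++ pvPairsL rest

theorem pvInner_eq (xs : List Int) (i : Int) (hi : 0 ≤ i) (acc : List (Int × Int × Int)) :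
    (PySem.List.pyRange (i + 1) (xs.length : Int)).foldl (fun acc2 j =>
      let xL := PySem.List.pyGetD xs i 0
      let xR := PySem.List.pyGetD xs j 0
      let width := xR - xL
      if LANE_WIDTH_MIN ≤ width ∧ width ≤ LANE_WIDTH_MAX then acc2 ++ [(xL, xR, width)]
      else acc2) acc = acc ++ pvG xs i.toNat := by
  rw [PySem.List.foldl_pyRange_pyGetD' xs 0
    (fun acc2 y =>
      if LANE_WIDTH_MIN ≤ y - PySem.List.pyGetD xs i 0 ∧ y - PySem.List.pyGetD xs i 0 ≤ LANE_WIDTH_MAX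
      then acc2 ++ [(PySem.List.pyGetD xs i 0, y, y - PySem.List.pyGetD xs i 0)] else acc2) acc
    (by omega)]
  rw [PySem.List.foldl_congr_mem _ _ (fun acc2 y =>
      if ((decide (140 ≤ y - xs.getD i.toNat 0)) && (decide (y - xs.getD i.toNat 0 ≤ 420))) = true
      then acc2 ++ [(xs.getD i.toNat 0, y, y - xs.getD i.toNat 0)] else acc2) acc ?_]
  · rw [PySem.List.foldl_append_if]
    have : (i + 1).toNat = i.toNat + 1 := by omega
    rw [this]
    rfl
  · intro a y _
    rw [PySem.List.pyGetD_of_nonneg xs 0 hi]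
    by_cases h1 : 140 ≤ y - xs.getD i.toNat 0 <;> by_cases h2 : y - xs.getD i.toNat 0 ≤ 420 <;>
      simp [LANE_WIDTH_MIN, LANE_WIDTH_MAX, h1, h2]

theorem pvPairsA_eq_flatMap (xs : List Int) :
    pvPairsA xs = (List.range xs.length).flatMap (pvG xs) := by
  unfold pvPairsA
  rw [PySem.List.foldl_congr_mem _ _ (fun acc i => acc ++ pvG xs i.toNat) [] ?_]
  · rw [PySem.List.foldl_append_eq_flatMap]
    rw [PySem.List.pyRange_zero_nat, List.flatMap_map]
    simp
  · intro acc i hi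
    have h0 : 0 ≤ i := (PySem.List.mem_pyRange_one.mp hi).1
    exact pvInner_eq xs i h0 acc

theorem pvFlatMap_eq_pairsL (xs : List Int) :
    (List.range xs.length).flatMap (pvG xs) = pvPairsL xs := by
  induction xs with
  | nil => simp [pvPairsL]
  | cons x rest ih =>
      rw [List.length_cons, List.range_succ_eq_map, List.flatMap_cons, List.flatMap_map]
      have h1 : pvG (x :: rest) 0 =
          ((rest.filter (fun y => decide (140 ≤ y - x) && decide (y - x ≤ 420))).map
            (fun y => (x, y, y - x))) := by
        simp [pvG]
      have h2 : ∀ k : Nat, pvG (x :: rest) (k + 1) = pvG rest k := by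
        intro k; simp [pvG]
      simp only [h1]
      rw [List.flatMap_congr (fun k _ => h2 k), ih, pvPairsL]

theorem pvPairsA_eq (xs : List Int) : pvPairsA xs = pvPairsL xs := by
  rw [pvPairsA_eq_flatMap, pvFlatMap_eq_pairsL]

theorem pvMem_pairsL {p : Int × Int × Int} {l : List Int} (h : p ∈ pvPairsL l) :
    p.1 ∈ l ∧ p.2.1 ∈ l ∧ p.2.2 = p.2.1 - p.1 ∧ 140 ≤ p.2.2 ∧ p.2.2 ≤ 420 := by
  induction l with
  | nil => simp [pvPairsL] at h
  | cons x rest ih =>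
      rw [pvPairsL, List.mem_append] at h
      rcases h with h | h
      · simp only [List.mem_map, List.mem_filter] at h
        obtain ⟨y, ⟨hy, hcond⟩, rfl⟩ := h
        simp only [Bool.and_eq_true, decide_eq_true_eq] at hcond
        refine ⟨List.mem_cons_self, List.mem_cons_of_mem _ hy, rfl, hcond.1, hcond.2⟩
      · obtain ⟨a, b, c, d, e⟩ := ih h
        exact ⟨List.mem_cons_of_mem _ a, List.mem_cons_of_mem _ b, c, d, e⟩

-- lexicographic "≤" on the sort key (xL, width) of A's pair sort
def pvKeyLe (p q : Int × Int × Int) : Prop :=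
  p.1 < q.1 ∨ (p.1 = q.1 ∧ p.2.2 ≤ q.2.2)

-- the comparator PySem.List.sorted2 uses for key (p.1, p.2.2), reverse=false
def pvBef (p q : Int × Int × Int) : Bool :=
  decide (p.1 < q.1) || (!decide (q.1 < p.1) && decide (p.2.2 < q.2.2))

theorem pvBef_false_iff (p q : Int × Int × Int) : pvBef p q = false ↔ pvKeyLe q p := by
  simp only [pvBef, pvKeyLe, Bool.or_eq_false_iff, Bool.and_eq_false_iff,
    decide_eq_false_iff_not, Bool.not_eq_false', decide_eq_true_eq]
  omega

theorem pvSorted2_eq (l : List (Int × Int × Int)) :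
    PySem.List.sorted2 l (fun p => p.1) (fun p => p.2.2) =
      l.foldl (fun acc x => PySem.List.insertBy pvBef x acc) [] := rfl

theorem pvInsertBy_pairwise (x : Int × Int × Int) (l : List (Int × Int × Int))
    (h : l.Pairwise (fun a b => pvBef b a = false)) :
    (PySem.List.insertBy pvBef x l).Pairwise (fun a b => pvBef b a = false) := by
  induction l with
  | nil =>
      simp [PySem.List.insertBy]
  | cons y ys ih =>
      rw [PySem.List.insertBy]
      rw [List.pairwise_cons] at h
      by_cases hxy : pvBef x y = true
      · rw [if_pos hxy]
        refine List.Pairwise.cons ?_ (List.Pairwise.cons h.1 h.2)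
        intro z hz
        rcases List.mem_cons.mp hz with rfl | hz
        · rw [pvBef_false_iff]; rw [pvBef] at hxy
          simp only [Bool.or_eq_true, Bool.and_eq_true, decide_eq_true_eq,
            Bool.not_eq_true', decide_eq_false_iff_not] at hxy
          simp only [pvKeyLe]; omega
        · have hzy := h.1 z hz
          rw [pvBef_false_iff] at hzy ⊢
          rw [pvBef] at hxy
          simp only [Bool.or_eq_true, Bool.and_eq_true, decide_eq_true_eq,
            Bool.not_eq_true', decide_eq_false_iff_not] at hxy
          simp only [pvKeyLe] at hzy ⊢; omega
      · rw [if_neg hxy]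
        refine List.Pairwise.cons ?_ (ih h.2)
        intro z hz
        rcases (PySem.List.mem_insertBy pvBef x z ys).mp hz with rfl | hz
        · exact Bool.not_eq_true _ ▸ (by simpa using hxy)
        · exact h.1 z hz

theorem pvFoldl_insert_pairwise (l acc : List (Int × Int × Int))
    (h : acc.Pairwise (fun a b => pvBef b a = false)) :
    (l.foldl (fun acc x => PySem.List.insertBy pvBef x acc) acc).Pairwise
      (fun a b => pvBef b a = false) := by
  induction l generalizing acc with
  | nil => exact h
  | cons x xs ih => exact ih _ (pvInsertBy_pairwise x acc h)

theorem pvHead_sorted2_min {l : List (Int × Int × Int)} {m : Int × Int × Int}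
    {t : List (Int × Int × Int)}
    (h : PySem.List.sorted2 l (fun p => p.1) (fun p => p.2.2) = m :: t) :
    m ∈ l ∧ ∀ p ∈ l, pvKeyLe m p := by
  have hperm := PySem.List.sorted2_perm l (fun p => p.1) (fun p => p.2.2) false
  rw [h] at hperm
  constructor
  · exact hperm.mem_iff.mp List.mem_cons_self
  · intro p hp
    have hpw := pvFoldl_insert_pairwise l [] (by simp)
    rw [← pvSorted2_eq, h, List.pairwise_cons] at hpw
    rcases List.mem_cons.mp (hperm.mem_iff.mpr hp) with rfl | hpt
    · right; exact ⟨rfl, le_refl _⟩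
    · exact (pvBef_false_iff p m).mp (hpw.1 p hpt)

theorem pvScanB_none {x : Int} {l : List Int} (hs : l.Pairwise (· ≤ ·))
    (h : pvScanB x l = none) : ∀ y ∈ l, ¬(140 ≤ y - x ∧ y - x ≤ 420) := by
  induction l with
  | nil => simp
  | cons y0 ys ih =>
      rw [List.pairwise_cons] at hs
      rw [pvScanB] at h
      intro y hy
      by_cases h1 : y0 - x < 140
      · rw [if_pos h1] at h
        rcases List.mem_cons.mp hy with rfl | hy
        · omega
        · exact ih hs.2 h y hy
      · rw [if_neg h1] at h
        by_cases h2 : y0 - x ≤ 420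
        · rw [if_pos h2] at h; exact absurd h (by simp)
        · rcases List.mem_cons.mp hy with rfl | hy
          · omega
          · have := hs.1 y hy; omega

theorem pvScanB_some {x a b : Int} {l : List Int} (hs : l.Pairwise (· ≤ ·))
    (h : pvScanB x l = some (a, b)) :
    a = x ∧ b ∈ l ∧ 140 ≤ b - x ∧ b - x ≤ 420 ∧
      ∀ y ∈ l, (140 ≤ y - x ∧ y - x ≤ 420) → b ≤ y := by
  induction l with
  | nil => simp [pvScanB] at h
  | cons y0 ys ih =>
      rw [List.pairwise_cons] at hs
      rw [pvScanB] at h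
      by_cases h1 : y0 - x < 140
      · rw [if_pos h1] at h
        obtain ⟨ha, hb, h3, h4, h5⟩ := ih hs.2 h
        refine ⟨ha, List.mem_cons_of_mem _ hb, h3, h4, ?_⟩
        intro y hy hv
        rcases List.mem_cons.mp hy with rfl | hy
        · omega
        · exact h5 y hy hv
      · rw [if_neg h1] at h
        by_cases h2 : y0 - x ≤ 420
        · rw [if_pos h2] at h
          obtain ⟨rfl, rfl⟩ : a = x ∧ b = y0 := by
            simpa [Prod.ext_iff, eq_comm] using h
          refine ⟨rfl, List.mem_cons_self, by omega, h2, ?_⟩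
          intro y hy _
          rcases List.mem_cons.mp hy with rfl | hy
          · exact le_refl _
          · exact hs.1 y hy
        · rw [if_neg h2] at h; exact absurd h (by simp)

theorem pvLoopB_shape (l : List Int) :
    pvLoopB l = (none, none) ∨ ∃ a b, pvLoopB l = (some a, some b) := by
  induction l with
  | nil => left; rfl
  | cons x xs ih =>
      rw [pvLoopB]
      cases h : pvScanB x xs with
      | none => exact ih
      | some r =>
          obtain ⟨a, b⟩ := r
          right; exact ⟨a, b, rfl⟩

theorem pvLoopB_none {l : List Int} (hs : l.Pairwise (· ≤ ·))
    (h : pvLoopB l = (none, none)) : pvPairsL l = [] := by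
  induction l with
  | nil => rfl
  | cons x xs ih =>
      rw [List.pairwise_cons] at hs
      rw [pvLoopB] at h
      cases hscan : pvScanB x xs with
      | some r =>
          rw [hscan] at h
          cases r; simp at h
      | none =>
          rw [hscan] at h
          rw [pvPairsL, ih hs.2 h, List.append_nil]
          have := pvScanB_none hs.2 hscan
          rw [List.map_eq_nil_iff, List.filter_eq_nil_iff]
          intro y hy
          have := this y hy
          simp only [Bool.and_eq_true, decide_eq_true_eq]
          omega

theorem pvLoopB_some {l : List Int} {a b : Int} (hs : l.Pairwise (· ≤ ·))
    (h : pvLoopB l = (some a, some b)) :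
    (a, b, b - a) ∈ pvPairsL l ∧ ∀ p ∈ pvPairsL l, pvKeyLe (a, b, b - a) p := by
  induction l with
  | nil => simp [pvLoopB] at h
  | cons x xs ih =>
      rw [List.pairwise_cons] at hs
      rw [pvLoopB] at h
      cases hscan : pvScanB x xs with
      | some r =>
          obtain ⟨a0, b0⟩ := r
          rw [hscan] at h
          have hab : a0 = a ∧ b0 = b := by simpa [Prod.ext_iff] using h
          rw [hab.1, hab.2] at hscan
          obtain ⟨rfl, hbmem, hb1, hb2, hbmin⟩ := pvScanB_some hs.2 hscan
          constructor
          · rw [pvPairsL, List.mem_append]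
            left
            simp only [List.mem_map, List.mem_filter]
            exact ⟨b, ⟨hbmem, by simp only [Bool.and_eq_true, decide_eq_true_eq]; omega⟩, rfl⟩
          · intro p hp
            rw [pvPairsL, List.mem_append] at hp
            rcases hp with hp | hp
            · simp only [List.mem_map, List.mem_filter] at hp
              obtain ⟨y, ⟨hy, hcond⟩, rfl⟩ := hp
              simp only [Bool.and_eq_true, decide_eq_true_eq] at hcond
              have := hbmin y hy ⟨hcond.1, hcond.2⟩
              right
              exact ⟨rfl, show b - a ≤ y - a by omega⟩
            · obtain ⟨hp1, hp2, hp3, hp4, hp5⟩ := pvMem_pairsL hp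
              have hx1 : a ≤ p.1 := hs.1 p.1 hp1
              rcases lt_or_eq_of_le hx1 with hlt | heq
              · left; exact hlt
              · have := hbmin p.2.1 hp2 (by omega)
                right
                exact ⟨heq, show b - a ≤ p.2.2 by omega⟩
      | none =>
          rw [hscan] at h
          obtain ⟨hmem, hmin⟩ := ih hs.2 h
          have hnil : (xs.filter (fun y => decide (140 ≤ y - x) && decide (y - x ≤ 420))) = [] := by
            rw [List.filter_eq_nil_iff]
            intro y hy
            have := pvScanB_none hs.2 hscan y hy
            simp only [Bool.and_eq_true, decide_eq_true_eq]
            omega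
          rw [pvPairsL, hnil, List.map_nil, List.nil_append]
          exact ⟨hmem, hmin⟩

theorem pvLoopB_short {l : List Int} (h : l.length < 2) : pvLoopB l = (none, none) := by
  match l with
  | [] => rfl
  | [x] => rfl
  | x :: y :: t => simp at h

theorem pv_main : ∀ (cluster_centers : List Int) (w : Int),
    choose_lane_edges cluster_centers w = choose_lane_edges_alt cluster_centers w := by
  intro cc w
  unfold choose_lane_edges choose_lane_edges_alt
  have hs : (PySem.List.sorted cc (fun x => x)).Pairwise (· ≤ ·) :=
    PySem.List.sorted_pairwise cc (fun x => x)
  set xs := PySem.List.sorted cc (fun x => x) with hxs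
  by_cases hlen : cc.length < 2
  · rw [if_pos hlen]
    have hx2 : xs.length < 2 := by rw [hxs, PySem.List.length_sorted]; exact hlen
    exact (pvLoopB_short hx2).symm
  · rw [if_neg hlen]
    simp only [pvPairsA_eq]
    by_cases hp : pvPairsL xs = []
    · rw [if_pos hp]
      rcases pvLoopB_shape xs with h | ⟨a, b, h⟩
      · exact h.symm
      · exfalso
        have hmem := (pvLoopB_some hs h).1
        rw [hp] at hmem
        exact absurd hmem List.not_mem_nil
    · rw [if_neg hp]
      rw [if_pos (show carril_objetivo = "LEFT" from rfl)]
      have hne : PySem.List.sorted2 (pvPairsL xs) (fun p => p.1) (fun p => p.2.2) ≠ [] := by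
        intro h0
        have hperm := PySem.List.sorted2_perm (pvPairsL xs) (fun p => p.1) (fun p => p.2.2) false
        rw [h0] at hperm
        exact hp hperm.symm.eq_nil
      obtain ⟨m, t, hmt⟩ := List.exists_cons_of_ne_nil hne
      rw [hmt]
      obtain ⟨hmmem, hmmin⟩ := pvHead_sorted2_min hmt
      rcases pvLoopB_shape xs with h | ⟨a, b, h⟩
      · exfalso; exact hp (pvLoopB_none hs h)
      · obtain ⟨hbmem, hbmin⟩ := pvLoopB_some hs h
        have k1 : pvKeyLe m (a, b, b - a) := hmmin _ hbmem
        have k2 : pvKeyLe (a, b, b - a) m := hbmin m hmmem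
        obtain ⟨_, _, hm3, _, _⟩ := pvMem_pairsL hmmem
        simp only [pvKeyLe] at k1 k2
        have hma : m.1 = a := by omega
        have hmb : m.2.1 = b := by omega
        rw [h]
        show (some m.1, some m.2.1) = (some a, some b)
        rw [hma, hmb]

-- ===== VERDICT (by name: the statement is the Claim_ definition above) =====
theorem choose_lane_edges_spec : Claim_equal_choose_lane_edges := by
  intro cluster_centers w _
  show choose_lane_edges cluster_centers w = choose_lane_edges_alt cluster_centers w
  exact pv_main cluster_centers w
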